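-- pv_equiv track=rewrite | github.com/mnuman/advent-of-code | 2021/day05.py | vent_trajectory_v1
-- ===== SOURCE A (Python) =====
-- from typing import Tuple, Callable
--
-- CoordinatePair = Tuple[int, int]
--
-- Vent = Tuple[CoordinatePair, CoordinatePair]
--
-- def is_horizontal_vent(vent: Vent) -> bool:
--     """Horizontal vents have the same y coordinate, only x varies"""
--     return vent[0][1] == vent[1][1]
--
-- def is_vertical_vent(vent: Vent) -> bool:
--     """Horizontal vents have the same x coordinate, only y varies"""
--     return vent[0][0] == vent[1][0]
--
-- def vent_trajectory_v1(vent: Vent) -> list[CoordinatePair]: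
--     """For a given vent, calculate all coordinate pairs covered. Currently, only horizontal or vertical vents
--        are supported
--     """
--     if is_horizontal_vent(vent):
--         xmin, xmax, y = min(vent[0][0], vent[1][0]), max(vent[0][0], vent[1][0]), vent[0][1]
--         return [(x, y) for x in range(xmin, xmax + 1)]
--     elif is_vertical_vent(vent):
--         ymin, ymax, x = min(vent[0][1], vent[1][1]), max(vent[0][1], vent[1][1]), vent[0][0]
--         return [(x, y) for y in range(ymin, ymax + 1)]
--     return []
-- ===== SOURCE B (Python) =====
-- def vent_trajectory_v1(vent):
--     """Bounding-box sweep: for axis-aligned vents one range collapses to a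
--     single value, so a single nested comprehension yields the trajectory."""
--     (x1, y1), (x2, y2) = vent
--     if x1 != x2 and y1 != y2:
--         return []
--     return [(x, y)
--             for x in range(min(x1, x2), max(x1, x2) + 1)
--             for y in range(min(y1, y2), max(y1, y2) + 1)]
-- ===== Notes on version B (the rewrite author's own statement) =====
-- stated objective: simpler
-- what changed: Replaces the two orientation-specific branches with one guard plus a single bounding-box sweep (nested comprehension over both sorted coordinate ranges), one of which collapses to a single value.
import Mathlib
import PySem

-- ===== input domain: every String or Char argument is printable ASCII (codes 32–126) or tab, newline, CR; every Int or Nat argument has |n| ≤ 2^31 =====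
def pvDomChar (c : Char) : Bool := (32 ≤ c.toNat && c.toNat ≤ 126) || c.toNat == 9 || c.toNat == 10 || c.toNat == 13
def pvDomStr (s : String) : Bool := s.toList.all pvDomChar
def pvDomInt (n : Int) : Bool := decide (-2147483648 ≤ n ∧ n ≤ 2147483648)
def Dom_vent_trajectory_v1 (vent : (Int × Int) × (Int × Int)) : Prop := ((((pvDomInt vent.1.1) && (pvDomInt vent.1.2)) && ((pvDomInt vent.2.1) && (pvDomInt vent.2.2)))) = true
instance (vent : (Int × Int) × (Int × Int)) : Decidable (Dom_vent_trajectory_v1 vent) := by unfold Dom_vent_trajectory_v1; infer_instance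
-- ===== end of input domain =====

-- ===== PORT A =====
-- A: two orientation branches, each a single range comprehension
def vent_trajectory_v1 (vent : (Int × Int) × (Int × Int)) : List (Int × Int) :=
  if vent.1.2 == vent.2.2 then
    let xmin := min vent.1.1 vent.2.1
    let xmax := max vent.1.1 vent.2.1
    let y := vent.1.2
    (PySem.List.pyRange xmin (xmax + 1) 1).map (fun x => (x, y))
  else if vent.1.1 == vent.2.1 then
    let ymin := min vent.1.2 vent.2.2
    let ymax := max vent.1.2 vent.2.2
    let x := vent.1.1
    (PySem.List.pyRange ymin (ymax + 1) 1).map (fun y => (x, y))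
  else []

-- ===== PORT B =====
-- B: guard, then one bounding-box sweep (nested comprehension)
def vent_trajectory_v1_alt (vent : (Int × Int) × (Int × Int)) : List (Int × Int) :=
  let x1 := vent.1.1; let y1 := vent.1.2; let x2 := vent.2.1; let y2 := vent.2.2
  if x1 ≠ x2 ∧ y1 ≠ y2 then []
  else
    (PySem.List.pyRange (min x1 x2) (max x1 x2 + 1) 1).flatMap (fun x =>
      (PySem.List.pyRange (min y1 y2) (max y1 y2 + 1) 1).map (fun y => (x, y)))

-- ===== PRECONDITION & SPEC =====
def Spec_vent_trajectory_v1 (vent : (Int × Int) × (Int × Int)) (out : List (Int × Int)) : Prop := out = vent_trajectory_v1_alt vent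
instance (vent : (Int × Int) × (Int × Int)) (out : List (Int × Int)) : Decidable (Spec_vent_trajectory_v1 vent out) := by unfold Spec_vent_trajectory_v1; infer_instance

-- ===== CLAIM (what is proved, stated in full; the proofs are below) =====
def Claim_equal_vent_trajectory_v1 : Prop := ∀ (vent : (Int × Int) × (Int × Int)), Dom_vent_trajectory_v1 vent → Spec_vent_trajectory_v1 vent (vent_trajectory_v1 vent)

-- ===== LEMMAS AND PROOFS =====

-- ===== VERDICT (by name: the statement is the Claim_ definition above) =====
lemma pv_flatMap_singleton_eq_map {α : Type} (l : List Int) (f : Int → α) :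
    l.flatMap (fun x => [f x]) = l.map f := by
  induction l with
  | nil => rfl
  | cons a t ih => simp [List.flatMap_cons, ih]

theorem vent_trajectory_v1_spec : Claim_equal_vent_trajectory_v1 := by
  intro vent _
  obtain ⟨⟨x1, y1⟩, x2, y2⟩ := vent
  unfold Spec_vent_trajectory_v1 vent_trajectory_v1 vent_trajectory_v1_alt
  by_cases hy : y1 = y2
  · subst hy
    simp [PySem.List.pyRange_one_singleton, pv_flatMap_singleton_eq_map]
  · by_cases hx : x1 = x2
    · subst hx
      simp [hy, PySem.List.pyRange_one_singleton]
    · simp [hx, hy]
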